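-- pv_equiv track=rewrite | github.com/datebonnie/comfyseniors | scripts/scrape_emails.py | prioritize_emails
-- ===== SOURCE A (Python) =====
-- def prioritize_emails(emails: list[str], facility_name: str) -> str | None:
--     """Pick the best email from a list — prefer info@, contact@, admin@, then others."""
--     if not emails:
--         return None
--
--     # Priority order
--     priority_prefixes = ['info', 'contact', 'admin', 'office', 'hello', 'admissions', 'intake', 'general']
--
--     for prefix in priority_prefixes:
--         for email in emails:
--             if email.lower().startswith(prefix + '@'):
--                 return email
--
--     # Return the first valid one
--     return emails[0]
-- ===== SOURCE B (Python) =====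
-- def prioritize_emails(emails: list[str], facility_name: str) -> str | None:
--     """Single pass: pick the email with the smallest priority rank (first wins ties)."""
--     if not emails:
--         return None
--     prefixes = ['info', 'contact', 'admin', 'office', 'hello', 'admissions', 'intake', 'general']
--     def rank(email):
--         low = email.lower()
--         return next((i for i, p in enumerate(prefixes) if low.startswith(p + '@')), len(prefixes))
--     return min(emails, key=rank)
-- ===== Notes on version B (the rewrite author's own statement) =====
-- stated objective: alternative
-- what changed: Replaces the priority-first nested scan (for each prefix, rescan all emails) by a single pass: each email gets a numeric rank from the prefix table and min(emails, key=rank) returns the first email of strictly smallest rank.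
import Mathlib
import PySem

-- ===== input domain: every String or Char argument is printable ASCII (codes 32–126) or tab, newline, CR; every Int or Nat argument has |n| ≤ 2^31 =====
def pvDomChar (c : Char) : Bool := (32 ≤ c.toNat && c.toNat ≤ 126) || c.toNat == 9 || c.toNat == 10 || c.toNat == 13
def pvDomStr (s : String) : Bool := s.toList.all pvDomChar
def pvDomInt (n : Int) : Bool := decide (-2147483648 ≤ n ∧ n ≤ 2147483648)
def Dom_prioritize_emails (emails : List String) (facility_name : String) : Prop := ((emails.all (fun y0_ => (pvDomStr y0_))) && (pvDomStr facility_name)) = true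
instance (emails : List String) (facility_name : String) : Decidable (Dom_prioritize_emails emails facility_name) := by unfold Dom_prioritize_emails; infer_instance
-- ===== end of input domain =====

-- B replaces A's priority-first nested scan by one pass taking the first email of minimal
-- prefix rank (min with key); return values proved equal on the whole domain.
-- ===== PORT A =====
def prioritize_emails (emails : List String) (facility_name : String) : Option String :=
  if emails = [] then
    none
  else
    let priority_prefixes : List String := ["info", "contact", "admin", "office", "hello", "admissions", "intake", "general"]
    match priority_prefixes.findSome? (fun pre =>
        emails.find? (fun email => PySem.Str.startswith (PySem.Str.lower email) (pre ++ "@"))) with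
    | some email => some email
    | none => PySem.List.pyGet? emails 0

-- ===== PORT B =====
-- B-side helpers: the fixed priority table and the per-email rank (index of the matching
-- prefix, 8 when none matches)
def pvPrefixes : List String := ["info", "contact", "admin", "office", "hello", "admissions", "intake", "general"]

def pvRank (email : String) : Nat :=
  let low := PySem.Str.lower email
  pvPrefixes.findIdx (fun p => PySem.Str.startswith low (p ++ "@"))

def prioritize_emails_alt (emails : List String) (facility_name : String) : Option String :=
  if emails = [] then
    none
  else
    PySem.List.min? emails pvRank

-- ===== PRECONDITION & SPEC =====
def Spec_prioritize_emails (emails : List String) (facility_name : String) (out : Option String) : Prop := out = prioritize_emails_alt emails facility_name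
instance (emails : List String) (facility_name : String) (out : Option String) : Decidable (Spec_prioritize_emails emails facility_name out) := by unfold Spec_prioritize_emails; infer_instance

-- ===== CLAIM (what is proved, stated in full; the proofs are below) =====
def Claim_equal_prioritize_emails : Prop := ∀ (emails : List String) (facility_name : String), Dom_prioritize_emails emails facility_name → Spec_prioritize_emails emails facility_name (prioritize_emails emails facility_name)

-- ===== LEMMAS AND PROOFS =====

-- A's matcher, as a named predicate (the very expression both ports evaluate per email)
def pvMatch (p email : String) : Bool :=
  PySem.Str.startswith (PySem.Str.lower email) (p ++ "@")

-- r is the FIRST element of xs of minimal pvRank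
def pvFirstMin (xs : List String) (r : String) : Prop :=
  ∃ p q, xs = p ++ r :: q ∧ (∀ y ∈ p, pvRank r < pvRank y) ∧ (∀ y ∈ xs, pvRank r ≤ pvRank y)

theorem pvRank_def (e : String) : pvRank e = List.findIdx (fun p => pvMatch p e) pvPrefixes := rfl

theorem pvRank_le (e : String) : pvRank e ≤ 8 := by
  have := List.findIdx_le_length (p := fun p => pvMatch p e) (xs := pvPrefixes)
  rw [pvRank_def]
  simpa [pvPrefixes] using this

-- no "<prefix>@" among the eight is a prefix of another: checked by computation
theorem pvIncompat : ∀ i, i < 8 → ∀ j, j < 8 → i ≠ j →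
    ¬(((pvPrefixes.getD i "").toList ++ ['@']) <+: ((pvPrefixes.getD j "").toList ++ ['@'])) := by
  decide

-- at most one prefix can match a given email
theorem pvMatch_unique {e : String} {i j : Nat} (hi : i < 8) (hj : j < 8)
    (hmi : pvMatch (pvPrefixes.getD i "") e = true)
    (hmj : pvMatch (pvPrefixes.getD j "") e = true) : i = j := by
  by_contra hne
  have pi : ((pvPrefixes.getD i "").toList ++ ['@']) <+: (PySem.Str.lower e).toList := by
    simpa [pvMatch, PySem.Chars.startswith_iff] using hmi
  have pj : ((pvPrefixes.getD j "").toList ++ ['@']) <+: (PySem.Str.lower e).toList := by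
    simpa [pvMatch, PySem.Chars.startswith_iff] using hmj
  rcases List.prefix_or_prefix_of_prefix pi pj with h | h
  · exact pvIncompat i hi j hj hne h
  · exact pvIncompat j hj i hi (Ne.symm hne) h

theorem pvMatch_iff_rank {e : String} {i : Nat} (hi : i < 8) :
    pvMatch (pvPrefixes.getD i "") e = true ↔ pvRank e = i := by
  have hlen : i < pvPrefixes.length := by simpa [pvPrefixes] using hi
  have hg : pvPrefixes.getD i "" = pvPrefixes[i]'hlen := List.getD_eq_getElem _ _ hlen
  rw [pvRank_def]
  constructor
  · intro hm
    rw [List.findIdx_eq hlen]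
    refine ⟨by rw [← hg]; exact hm, ?_⟩
    intro jj hji
    by_contra hb
    have hmj : pvMatch (pvPrefixes.getD jj "") e = true := by
      have hglen : jj < pvPrefixes.length := lt_trans hji hlen
      rw [List.getD_eq_getElem _ _ hglen]
      simpa using hb
    have := pvMatch_unique (by omega : jj < 8) hi hmj hm
    omega
  · intro hr
    rw [List.findIdx_eq hlen] at hr
    rw [hg]
    exact hr.1

-- the fold step inside PySem.List.min? at key pvRank, as a named function
def pvStep (acc : Option String) (x : String) : Option String :=
  match acc with
  | none => some x
  | some m => if pvRank x < pvRank m then some x else some m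

theorem pvMin?_eq (xs : List String) :
    PySem.List.min? xs pvRank = List.foldl pvStep none xs := by
  unfold PySem.List.min? pvStep
  congr 1
  funext acc x
  cases acc <;> rfl

-- B's fold returns the first element of minimal rank
theorem pvMinAux (t : List String) : ∀ m : String,
    ∃ r, List.foldl pvStep (some m) t = some r ∧ pvFirstMin (m :: t) r := by
  induction t with
  | nil =>
    intro m
    exact ⟨m, rfl, [], [], rfl, by simp, by simp⟩
  | cons y t ih =>
    intro m
    by_cases hlt : pvRank y < pvRank m
    · obtain ⟨r, hr, p, q, hsplit, hpre, hmin⟩ := ih y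
      refine ⟨r, by simpa [pvStep, hlt] using hr, m :: p, q, by rw [List.cons_append, ← hsplit], ?_, ?_⟩
      · intro z hz
        rcases List.mem_cons.mp hz with rfl | hz
        · have : pvRank r ≤ pvRank y := hmin y (by simp)
          omega
        · exact hpre z hz
      · intro z hz
        rcases List.mem_cons.mp hz with rfl | hz
        · have : pvRank r ≤ pvRank y := hmin y (by simp)
          omega
        · exact hmin z hz
    · obtain ⟨r, hr, p, q, hsplit, hpre, hmin⟩ := ih m
      refine ⟨r, by simpa [pvStep, hlt] using hr, ?_⟩
      cases p with
      | nil =>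
        simp only [List.nil_append, List.cons.injEq] at hsplit
        obtain ⟨rfl, rfl⟩ := hsplit
        refine ⟨[], y :: t, by simp, by simp, ?_⟩
        intro z hz
        rcases List.mem_cons.mp hz with rfl | hz
        · exact le_refl _
        · rcases List.mem_cons.mp hz with rfl | hz
          · omega
          · exact hmin z (List.mem_cons_of_mem _ hz)
      | cons a p2 =>
        simp only [List.cons_append, List.cons.injEq] at hsplit
        obtain ⟨rfl, ht⟩ := hsplit
        have hrm : pvRank r < pvRank m := hpre m (by simp)
        refine ⟨m :: y :: p2, q, by rw [ht]; simp, ?_, ?_⟩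
        · intro z hz
          rcases List.mem_cons.mp hz with rfl | hz
          · exact hrm
          · rcases List.mem_cons.mp hz with rfl | hz
            · omega
            · exact hpre z (List.mem_cons_of_mem _ hz)
        · intro z hz
          rcases List.mem_cons.mp hz with rfl | hz
          · exact le_of_lt hrm
          · rcases List.mem_cons.mp hz with rfl | hz
            · omega
            · exact hmin z (by rw [ht] at hz ⊢; exact List.mem_cons_of_mem _ hz)

-- A's prefix chain: some ⇒ first-min; none ⇒ every rank ≥ N
theorem pvChainSpec (N : Nat) (xs : List String) :
    (∀ r, (List.range N).findSome? (fun i => xs.find? (fun e => decide (pvRank e = i))) = some r →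
      pvFirstMin xs r) ∧
    ((List.range N).findSome? (fun i => xs.find? (fun e => decide (pvRank e = i))) = none →
      ∀ e ∈ xs, N ≤ pvRank e) := by
  induction N with
  | zero => exact ⟨fun r h => by simp at h, fun _ e _ => Nat.zero_le _⟩
  | succ N ih =>
    have hsingle : List.findSome? (fun i => xs.find? (fun e => decide (pvRank e = i))) [N]
        = xs.find? (fun e => decide (pvRank e = N)) := by
      cases hf : xs.find? (fun e => decide (pvRank e = N)) <;> simp [hf]
    rw [List.range_succ]
    constructor
    · intro r h
      rw [List.findSome?_append, hsingle] at h
      cases hc : (List.range N).findSome? (fun i => xs.find? (fun e => decide (pvRank e = i))) with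
      | some r0 =>
        rw [hc, Option.some_or] at h
        injection h with h2
        subst h2
        exact ih.1 r0 hc
      | none =>
        rw [hc, Option.none_or] at h
        have hge := ih.2 hc
        rw [List.find?_eq_some_iff_append] at h
        obtain ⟨hpr, as, bs, hsplit, hmiss⟩ := h
        have hrN : pvRank r = N := by simpa using hpr
        refine ⟨as, bs, hsplit, ?_, ?_⟩
        · intro y hy
          have hge1 : N ≤ pvRank y := hge y (hsplit ▸ List.mem_append_left _ hy)
          have hne1 : ¬ (pvRank y = N) := by simpa using hmiss y hy
          omega
        · intro y hy
          have hge1 : N ≤ pvRank y := hge y hy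
          omega
    · intro h e he
      rw [List.findSome?_append, hsingle] at h
      cases hc : (List.range N).findSome? (fun i => xs.find? (fun e => decide (pvRank e = i))) with
      | some r0 => rw [hc, Option.some_or] at h; exact absurd h (by simp)
      | none =>
        rw [hc, Option.none_or] at h
        have hge := ih.2 hc e he
        have hne : ¬ (pvRank e = N) := by
          have := List.find?_eq_none.mp h e he
          simpa using this
        omega

theorem pvFM_aux {xs : List String} {p q : List String} {r : String}
    {p' q' : List String} {r' : String}
    (hx : xs = p ++ r :: q) (hx' : xs = p' ++ r' :: q')
    (hpre' : ∀ y ∈ p', pvRank r' < pvRank y)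
    (hmin : ∀ y ∈ xs, pvRank r ≤ pvRank y)
    (hlt : p.length < p'.length) : False := by
  subst hx
  have hlen : p.length < (p ++ r :: q).length := by simp
  have e1 : (p ++ r :: q)[p.length]'hlen = r := by
    rw [List.getElem_append_right (le_refl p.length)]
    simp
  have e2 : (p ++ r :: q)[p.length]'hlen = p'[p.length]'hlt := by
    have h3 : (p' ++ r' :: q')[p.length]'(by rw [← hx']; exact hlen) = p'[p.length]'hlt :=
      List.getElem_append_left hlt
    rw [← h3]
    congr 1
  have hrmem : r ∈ p' := by
    rw [← e1, e2]
    exact List.getElem_mem _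
  have h1 : pvRank r' < pvRank r := hpre' r hrmem
  have h2 : pvRank r ≤ pvRank r' := hmin r' (hx' ▸ List.mem_append_right _ List.mem_cons_self)
  omega

theorem pvFirstMin_unique {xs : List String} {r r' : String}
    (h : pvFirstMin xs r) (h' : pvFirstMin xs r') : r = r' := by
  obtain ⟨p, q, hx, hpre, hmin⟩ := h
  obtain ⟨p', q', hx', hpre', hmin'⟩ := h'
  rcases Nat.lt_trichotomy p.length p'.length with hlt | heq | hgt
  · exact absurd (pvFM_aux hx hx' hpre' hmin hlt) not_false
  · have happ : p ++ r :: q = p' ++ r' :: q' := hx ▸ hx'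
    have hcons : (r :: q) = (r' :: q') := List.append_inj_right happ heq
    exact (List.cons.injEq _ _ _ _ ▸ hcons).1
  · exact absurd (pvFM_aux hx' hx hpre hmin' hgt) not_false

-- A's literal findSome? over the eight prefixes IS the rank chain over range 8
theorem pvA_eq_chain (xs : List String) :
    List.findSome? (fun pre =>
        xs.find? (fun email => PySem.Str.startswith (PySem.Str.lower email) (pre ++ "@")))
      ["info", "contact", "admin", "office", "hello", "admissions", "intake", "general"]
      = (List.range 8).findSome? (fun i => xs.find? (fun e => decide (pvRank e = i))) := by
  have hpred : ∀ i, i < 8 →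
      (fun email => PySem.Str.startswith (PySem.Str.lower email) ((pvPrefixes.getD i "") ++ "@"))
        = (fun e => decide (pvRank e = i)) := by
    intro i hi
    funext e
    rw [Bool.eq_iff_iff]
    simpa [pvMatch] using pvMatch_iff_rank (e := e) hi
  have h0 := hpred 0 (by omega); rw [show pvPrefixes.getD 0 "" = "info" from rfl] at h0
  have h1 := hpred 1 (by omega); rw [show pvPrefixes.getD 1 "" = "contact" from rfl] at h1
  have h2 := hpred 2 (by omega); rw [show pvPrefixes.getD 2 "" = "admin" from rfl] at h2
  have h3 := hpred 3 (by omega); rw [show pvPrefixes.getD 3 "" = "office" from rfl] at h3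
  have h4 := hpred 4 (by omega); rw [show pvPrefixes.getD 4 "" = "hello" from rfl] at h4
  have h5 := hpred 5 (by omega); rw [show pvPrefixes.getD 5 "" = "admissions" from rfl] at h5
  have h6 := hpred 6 (by omega); rw [show pvPrefixes.getD 6 "" = "intake" from rfl] at h6
  have h7 := hpred 7 (by omega); rw [show pvPrefixes.getD 7 "" = "general" from rfl] at h7
  rw [show List.range 8 = [0,1,2,3,4,5,6,7] from by decide]
  simp only [List.findSome?_cons, List.findSome?_nil]
  rw [h0, h1, h2, h3, h4, h5, h6, h7]

-- ===== VERDICT (by name: the statement is the Claim_ definition above) =====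
theorem prioritize_emails_spec : Claim_equal_prioritize_emails := by
  unfold Claim_equal_prioritize_emails
  intro emails fn _
  unfold Spec_prioritize_emails
  match emails with
  | [] => rfl
  | x :: t =>
    have hne : (x :: t : List String) ≠ [] := by simp
    simp only [prioritize_emails, prioritize_emails_alt, if_neg hne]
    obtain ⟨r', hr', hFM'⟩ := pvMinAux t x
    have hB : PySem.List.min? (x :: t) pvRank = some r' := by
      rw [pvMin?_eq, List.foldl_cons, show pvStep none x = some x from rfl]
      exact hr'
    rw [hB, pvA_eq_chain]
    cases hc : (List.range 8).findSome? (fun i => (x :: t).find? (fun e => decide (pvRank e = i))) with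
    | some r =>
      have hFM := (pvChainSpec 8 (x :: t)).1 r hc
      simp [pvFirstMin_unique hFM hFM']
    | none =>
      have hge := (pvChainSpec 8 (x :: t)).2 hc
      have hFMx : pvFirstMin (x :: t) x :=
        ⟨[], t, rfl, by simp, fun y hy => le_trans (pvRank_le x) (hge y hy)⟩
      have : x = r' := pvFirstMin_unique hFMx hFM'
      simp [PySem.List.pyGet?, PySem.List.pyIdx?, this]
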